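-- pv_equiv track=rewrite | github.com/stegra05/kicktipp-predictor | src/kicktipp_predictor/data.py | _classify_new_teams
-- ===== SOURCE A (Python) =====
-- def _classify_new_teams(
--
--     new_teams: set[str],
--     prior_presence: set[str],
-- ) -> dict[str, str]:
--     """Classify new entrants heuristically: promoted vs relegated.
--
--     Teams seen in earlier seasons of this league but absent last season
--     are treated as 'relegated' (likely stronger). Teams never seen before
--     are treated as 'promoted' (likely weaker).
--     """
--     classes: dict[str, str] = {}
--     for t in new_teams:
--         classes[t] = "relegated" if t in prior_presence else "promoted"
--     return classes
-- ===== SOURCE B (Python) =====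
-- def _classify_new_teams(
--
--     new_teams: set[str],
--     prior_presence: set[str],
-- ) -> dict[str, str]:
--     """Sort-and-merge variant: find the relegated group (teams seen before)
--     by a two-pointer merge of the two sorted team lists instead of per-element
--     hash membership, then label each new team against that group."""
--     xs = sorted(new_teams)
--     ys = sorted(prior_presence)
--     relegated: set[str] = set()
--     i = j = 0
--     while i < len(xs) and j < len(ys):
--         if xs[i] == ys[j]:
--             relegated.add(xs[i])
--             i += 1
--             j += 1
--         elif xs[i] < ys[j]:
--             i += 1
--         else:
--             j += 1
--     return {t: ("relegated" if t in relegated else "promoted") for t in new_teams}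
-- ===== Notes on version B (the rewrite author's own statement) =====
-- stated objective: alternative
-- what changed: Replaces A's per-element hash-membership test with a sort-then-scan algorithm: both sets are sorted and the relegated group is computed by a two-pointer merge intersection, after which teams are labelled against that group.
import Mathlib
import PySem

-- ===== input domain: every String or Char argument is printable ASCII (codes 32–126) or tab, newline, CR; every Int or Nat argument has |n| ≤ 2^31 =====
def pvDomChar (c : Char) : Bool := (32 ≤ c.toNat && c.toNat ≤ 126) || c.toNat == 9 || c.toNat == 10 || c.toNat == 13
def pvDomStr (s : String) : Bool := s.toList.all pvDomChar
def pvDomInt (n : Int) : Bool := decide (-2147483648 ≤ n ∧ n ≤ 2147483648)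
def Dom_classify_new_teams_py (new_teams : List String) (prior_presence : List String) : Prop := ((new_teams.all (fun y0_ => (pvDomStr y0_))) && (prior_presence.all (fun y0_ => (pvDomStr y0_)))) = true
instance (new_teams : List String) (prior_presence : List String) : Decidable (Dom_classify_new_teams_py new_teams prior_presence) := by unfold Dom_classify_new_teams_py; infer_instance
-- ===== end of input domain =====

-- B replaces A's per-element hash-membership branch by a sort-then-scan algorithm: the
-- relegated group is the two-pointer merge intersection of the two sorted team lists
-- (alternative decomposition, not claimed faster).

-- ===== PORT A =====
-- classes = {}; for t in new_teams: classes[t] = "relegated" if t in prior_presence else "promoted"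
def classify_new_teams_py (new_teams : List String) (prior_presence : List String) : List (String × String) :=
  (new_teams.foldl
      (fun classes t =>
        classes.insert t (if prior_presence.contains t then "relegated" else "promoted"))
      PySem.Dict.empty).items

-- ===== PORT B =====
-- the while loop over the two cursors i, j: each step consumes the head of one
-- (or both) sorted lists; the loop stops when either list is exhausted
def pvMerge (acc : PySem.Set String) : List String → List String → PySem.Set String
  | x :: xs, y :: ys =>
    if x = y then pvMerge (PySem.Set.add acc x) xs ys
    else if x < y then pvMerge acc xs (y :: ys)
    else pvMerge acc (x :: xs) ys
  | _, _ => acc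
termination_by xs ys => xs.length + ys.length
decreasing_by all_goals (simp only [List.length_cons]; omega)

-- xs = sorted(new_teams); ys = sorted(prior_presence); relegated = two-pointer merge;
-- return {t: ("relegated" if t in relegated else "promoted") for t in new_teams}
def classify_new_teams_py_alt (new_teams : List String) (prior_presence : List String) : List (String × String) :=
  let xs := PySem.List.sorted new_teams (fun t => t) false
  let ys := PySem.List.sorted prior_presence (fun t => t) false
  let relegated := pvMerge PySem.Set.empty xs ys
  (new_teams.foldl
      (fun classes t =>
        classes.insert t (if PySem.Set.contains relegated t then "relegated" else "promoted"))
      PySem.Dict.empty).items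

-- ===== PRECONDITION & SPEC =====
-- Both arguments are Python sets, so their List-of-distinct-elements encodings are
-- duplicate-free; Pre_ states that (it excludes no input the Python function accepts).
def Pre_classify_new_teams_py (new_teams : List String) (prior_presence : List String) : Prop :=
  new_teams.Nodup ∧ prior_presence.Nodup
instance (new_teams : List String) (prior_presence : List String) : Decidable (Pre_classify_new_teams_py new_teams prior_presence) := by unfold Pre_classify_new_teams_py; infer_instance

def pvWitness_classify_new_teams_py : List String × List String := (["a", "b"], ["b", "c"])

def Spec_classify_new_teams_py (new_teams : List String) (prior_presence : List String) (out : List (String × String)) : Prop := out = classify_new_teams_py_alt new_teams prior_presence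
instance (new_teams : List String) (prior_presence : List String) (out : List (String × String)) : Decidable (Spec_classify_new_teams_py new_teams prior_presence out) := by unfold Spec_classify_new_teams_py; infer_instance

-- ===== CLAIM (what is proved, stated in full; the proofs are below) =====
def Claim_equal_classify_new_teams_py : Prop := ∀ (new_teams : List String) (prior_presence : List String), Dom_classify_new_teams_py new_teams prior_presence → Pre_classify_new_teams_py new_teams prior_presence → Spec_classify_new_teams_py new_teams prior_presence (classify_new_teams_py new_teams prior_presence)

-- ===== LEMMAS AND PROOFS =====

-- the two-pointer merge of two strictly increasing lists collects exactly acc ∪ (xs ∩ ys)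
theorem pvMerge_mem (t : String) (acc : PySem.Set String) (xs ys : List String) :
    xs.Pairwise (· < ·) → ys.Pairwise (· < ·) →
    (t ∈ pvMerge acc xs ys ↔ t ∈ acc ∨ (t ∈ xs ∧ t ∈ ys)) := by
  fun_induction pvMerge acc xs ys with
  | case1 acc xs' y ys' ih =>
    intro hx hy
    rw [ih (List.pairwise_cons.mp hx).2 (List.pairwise_cons.mp hy).2, PySem.Set.mem_add]
    simp only [List.mem_cons]
    constructor
    · rintro ((h | rfl) | ⟨h1, h2⟩)
      · exact Or.inl h
      · exact Or.inr ⟨Or.inl rfl, Or.inl rfl⟩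
      · exact Or.inr ⟨Or.inr h1, Or.inr h2⟩
    · rintro (h | ⟨(rfl | h1), h2⟩)
      · exact Or.inl (Or.inl h)
      · exact Or.inl (Or.inr rfl)
      · rcases h2 with rfl | h2
        · exact Or.inl (Or.inr rfl)
        · exact Or.inr ⟨h1, h2⟩
  | case2 acc x xs' y ys' hne hlt ih =>
    intro hx hy
    have hy' := List.pairwise_cons.mp hy
    have hnot : x ∉ (y :: ys') := by
      simp only [List.mem_cons]
      rintro (rfl | hmem)
      · exact hne rfl
      · exact absurd (lt_trans hlt (hy'.1 x hmem)) (lt_irrefl x)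
    rw [ih (List.pairwise_cons.mp hx).2 hy]
    constructor
    · rintro (h | ⟨h1, h2⟩)
      · exact Or.inl h
      · exact Or.inr ⟨List.mem_cons_of_mem _ h1, h2⟩
    · rintro (h | ⟨h1, h2⟩)
      · exact Or.inl h
      · rcases List.mem_cons.mp h1 with rfl | h1'
        · exact absurd h2 hnot
        · exact Or.inr ⟨h1', h2⟩
  | case3 acc x xs' y ys' hne hnlt ih =>
    intro hx hy
    have hx' := List.pairwise_cons.mp hx
    have hnot : y ∉ (x :: xs') := by
      simp only [List.mem_cons]
      rintro (rfl | hmem)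
      · exact hne rfl
      · exact hnlt (hx'.1 y hmem)
    rw [ih hx (List.pairwise_cons.mp hy).2]
    constructor
    · rintro (h | ⟨h1, h2⟩)
      · exact Or.inl h
      · exact Or.inr ⟨h1, List.mem_cons_of_mem _ h2⟩
    · rintro (h | ⟨h1, h2⟩)
      · exact Or.inl h
      · rcases List.mem_cons.mp h2 with rfl | h2'
        · exact absurd h1 hnot
        · exact Or.inr ⟨h1, h2'⟩
  | case4 acc xs ys hm =>
    intro _ _
    rcases xs with _ | ⟨x, xs'⟩
    · simp
    · rcases ys with _ | ⟨y, ys'⟩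
      · simp
      · exact (hm x xs' y ys' rfl rfl).elim

theorem pv_main (new_teams prior_presence : List String)
    (h : Pre_classify_new_teams_py new_teams prior_presence) :
    classify_new_teams_py new_teams prior_presence
      = classify_new_teams_py_alt new_teams prior_presence := by
  obtain ⟨hN, hP⟩ := h
  -- strict sortedness of the two sorted duplicate-free lists
  have hpx : (PySem.List.sorted new_teams (fun t => t) false).Pairwise (· < ·) :=
    ((PySem.List.sorted_pairwise new_teams (fun t => t)).and
      (((PySem.List.sorted_perm new_teams (fun t => t) false).symm).nodup hN)).imp
      (fun h => lt_of_le_of_ne h.1 h.2)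
  have hpy : (PySem.List.sorted prior_presence (fun t => t) false).Pairwise (· < ·) :=
    ((PySem.List.sorted_pairwise prior_presence (fun t => t)).and
      (((PySem.List.sorted_perm prior_presence (fun t => t) false).symm).nodup hP)).imp
      (fun h => lt_of_le_of_ne h.1 h.2)
  simp only [classify_new_teams_py, classify_new_teams_py_alt]
  refine congrArg PySem.Dict.items ?_
  apply PySem.List.foldl_congr_mem
  intro acc x hx
  have hiff : x ∈ pvMerge PySem.Set.empty (PySem.List.sorted new_teams (fun t => t) false)
      (PySem.List.sorted prior_presence (fun t => t) false) ↔ x ∈ prior_presence := by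
    rw [pvMerge_mem x PySem.Set.empty _ _ hpx hpy]
    simp [PySem.List.mem_sorted, hx]
  have hc : PySem.Set.contains (pvMerge PySem.Set.empty
        (PySem.List.sorted new_teams (fun t => t) false)
        (PySem.List.sorted prior_presence (fun t => t) false)) x
      = prior_presence.contains x := by
    rw [PySem.Set.contains_eq_listContains, List.contains_eq_mem, List.contains_eq_mem,
      decide_eq_decide]
    exact hiff
  rw [hc]

-- ===== VERDICT (by name: the statement is the Claim_ definition above) =====
theorem classify_new_teams_py_spec : Claim_equal_classify_new_teams_py := by
  intro new_teams prior_presence _ hpre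
  exact pv_main new_teams prior_presence hpre
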